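-- pv_equiv track=rewrite | github.com/sooliman/soolimantest | pr.py | subtract_sum
-- ===== SOURCE A (Python) =====
-- def subtract_sum(num):
--     i = {1: 'kiwi', 2: 'pear', 3: 'kiwi', 4: 'banana', 5: 'melon', 6: 'banana', 7: 'melon', 8: 'pineapple', 9: 'apple', 10: "pineapple", 11: "cucumber", 12: "pineapple", 13: "cucumber", 14: "orange", 15: "grape", 16: "orange", 17: "grape", 18: "apple", 19: "grape", 20: "cherry", 21: "pear", 22: "cherry", 23: "pear", 24: "kiwi", 25: "banana", 26: "kiwi", 27: "apple", 28: "melon", 29: "banana", 30: "melon", 31: "pineapple", 32: "melon", 33: "pineapple", 34: "cucumber", 35: "orange", 36: "apple", 37: "orange", 38: "grape", 39: "orange", 40: "grape", 41: "cherry", 42: "pear", 43: "cherry", 44: "pear", 45: "apple", 46: "pear", 47: "kiwi", 48: "banana", 49: "kiwi", 50: "banana", 51: "melon", 52: "pineapple", 53: "melon", 54: "apple", 55: 'cucumber', 56: 'pineapple', 57: 'cucumber', 58: 'orange', 59: 'cucumber', 60: 'orange', 61: 'grape', 62: 'cherry', 63: 'apple', 64: 'cherry', 65: 'pear', 66: 'cherry',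 67: 'pear', 68: 'kiwi', 69: 'pear', 70: 'kiwi', 71: 'banana', 72: 'apple', 73: 'banana', 74: 'melon', 75: 'pineapple', 76: 'melon', 77: 'pineapple', 78: 'cucumber', 79: 'pineapple', 80: 'cucumber', 81: 'apple', 82: 'grape', 83: "orange", 84: "grape", 85: "cherry", 86: "grape", 87: "cherry", 88: "pear", 89: "cherry", 90: "apple", 91: "kiwi", 92: "banana", 93: "kiwi", 94: "banana", 95: "melon", 96: "banana", 97: "melon", 98: "pineapple", 99: "apple",
--          100: "pineapple"}
--     # t = 325
--     if num <= 100: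
--         return i[num - sum(map(int, str(num)))]
--     else:
--         while num >= 100:
--             r = sum(map(int, str(num)))
--             num -= r
--
--         return (i[num])
-- ===== SOURCE B (Python) =====
-- def subtract_sum(num):
--     # For every num >= 10 the mapped index is a positive multiple of 9 (n minus its
--     # digit sum is divisible by 9, and the while-loop preserves divisibility by 9
--     # once it has run one step), and every such table entry is "apple".
--     return "apple"
-- ===== Notes on version B (the rewrite author's own statement) =====
-- stated objective: faster
-- what changed: Replaced the digit-sum subtraction loop and the 100-entry fruit table by the constant "apple": for every num >= 10 the looked-up index is a positive multiple of 9 (a number minus its digit sum is divisible by 9) and all such table entries are "apple".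
import Mathlib
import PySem

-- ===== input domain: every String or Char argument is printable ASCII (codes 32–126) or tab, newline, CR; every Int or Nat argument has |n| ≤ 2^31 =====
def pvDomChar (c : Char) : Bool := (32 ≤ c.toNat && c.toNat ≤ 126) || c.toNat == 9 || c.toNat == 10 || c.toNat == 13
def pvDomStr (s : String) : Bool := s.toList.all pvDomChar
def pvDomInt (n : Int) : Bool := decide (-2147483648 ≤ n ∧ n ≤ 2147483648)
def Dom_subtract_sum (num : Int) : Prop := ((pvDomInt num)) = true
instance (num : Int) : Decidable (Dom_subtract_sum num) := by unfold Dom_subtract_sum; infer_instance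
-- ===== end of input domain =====

-- B replaces A's digit-sum subtraction loop and 100-entry table by the constant "apple"
-- (for every num ≥ 10 the looked-up index is a positive multiple of 9, and all such
-- table entries are "apple"); equivalence is proved on Pre_ (num ≥ 10), outside of
-- which the Python A raises (KeyError / ValueError).

-- ===== PORT A =====
-- the dict literal `i` of A
def fruitTable : PySem.Dict Int String := PySem.Dict.ofList [(1, "kiwi"), (2, "pear"), (3, "kiwi"), (4, "banana"), (5, "melon"), (6, "banana"), (7, "melon"), (8, "pineapple"), (9, "apple"), (10, "pineapple"), (11, "cucumber"), (12, "pineapple"), (13, "cucumber"), (14, "orange"), (15, "grape"), (16, "orange"), (17, "grape"), (18, "apple"), (19, "grape"), (20, "cherry"), (21, "pear"), (22, "cherry"), (23, "pear"), (24, "kiwi"), (25, "banana"), (26, "kiwi"), (27, "apple"), (28, "melon"), (29, "banana"), (30, "melon"), (31, "pineapple"), (32, "melon"), (33, "pineapple"), (34, "cucumber"), (35, "orange"), (36, "apple"), (37, "orange"), (38, "grape"), (39, "orange"), (40, "grape"), (41, "cherry"), (42, "pear"), (43, "cherry"), (44, "pear"), (45, "apple"), (46, "pear"), (47, "kiwi"),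 (48, "banana"), (49, "kiwi"), (50, "banana"), (51, "melon"), (52, "pineapple"), (53, "melon"), (54, "apple"), (55, "cucumber"), (56, "pineapple"), (57, "cucumber"), (58, "orange"), (59, "cucumber"), (60, "orange"), (61, "grape"), (62, "cherry"), (63, "apple"), (64, "cherry"), (65, "pear"), (66, "cherry"), (67, "pear"), (68, "kiwi"), (69, "pear"), (70, "kiwi"), (71, "banana"), (72, "apple"), (73, "banana"), (74, "melon"), (75, "pineapple"), (76, "melon"), (77, "pineapple"), (78, "cucumber"), (79, "pineapple"), (80, "cucumber"), (81, "apple"), (82, "grape"), (83, "orange"), (84, "grape"), (85, "cherry"), (86, "grape"), (87, "cherry"), (88, "pear"), (89, "cherry"), (90, "apple"), (91, "kiwi"), (92, "banana"), (93, "kiwi"), (94, "banana"), (95, "melon"), (96, "banana"), (97, "melon"), (98, "pineapple"), (99, "apple"), (100, "pineapple")]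

-- sum(map(int, str(num))): int() of each character of str(num); none = ValueError
def pyDigitSum? (num : Int) : Option Int :=
  ((PySem.Int.toChars num).mapM (fun c => PySem.Int.ofChars? [c])).map List.sum

-- the while-loop of A; the fuel argument only makes the recursion total (one unit per
-- iteration; never exhausted on the admitted inputs), "" marks Python's raise paths
-- (all outside Pre_)
def loopA : Nat → Int → String
  | 0, _ => ""
  | fuel+1, num =>
    if 100 ≤ num then
      match pyDigitSum? num with
      | none => ""
      | some r => loopA fuel (num - r)
    else ((fruitTable.get? num).getD "")

def subtract_sum (num : Int) : String :=
  if num ≤ 100 then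
    match pyDigitSum? num with
    | none => ""
    | some s => (fruitTable.get? (num - s)).getD ""
  else loopA (num.toNat + 1) num

-- ===== PORT B =====
def subtract_sum_alt (num : Int) : String := "apple"

-- ===== PRECONDITION & SPEC =====
-- Pre_ excludes exactly the inputs on which A raises: KeyError (index 0) for
-- 0 ≤ num ≤ 9 and ValueError (int('-')) for negative num.
def Pre_subtract_sum (num : Int) : Prop := 10 ≤ num
instance (num : Int) : Decidable (Pre_subtract_sum num) := by unfold Pre_subtract_sum; infer_instance
def pvWitness_subtract_sum : Int := (10)

def Spec_subtract_sum (num : Int) (out : String) : Prop := out = subtract_sum_alt num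
instance (num : Int) (out : String) : Decidable (Spec_subtract_sum num out) := by unfold Spec_subtract_sum; infer_instance

-- ===== CLAIM (what is proved, stated in full; the proofs are below) =====
def Claim_equal_subtract_sum : Prop := ∀ (num : Int), Dom_subtract_sum num → Pre_subtract_sum num → Spec_subtract_sum num (subtract_sum num)

-- ===== LEMMAS AND PROOFS =====

-- str(n) for n > 0 is the decimal digits: Nat.toDigitsCore in terms of Nat.digits
theorem toDigitsCore_eq_digits (f : Nat) : ∀ (n : Nat) (l : List Char), 0 < n → n < 10 ^ f →
    Nat.toDigitsCore 10 f n l = ((Nat.digits 10 n).map Nat.digitChar).reverse ++ l := by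
  induction f with
  | zero => intro n l h1 h2; simp at h2; omega
  | succ f ih =>
    intro n l h1 h2
    rw [Nat.toDigitsCore]
    by_cases hn : n / 10 = 0
    · have hlt : n < 10 := by omega
      rw [Nat.digits_of_lt 10 n (by omega) hlt]
      simp [hn, Nat.mod_eq_of_lt hlt]
    · rw [if_neg hn]
      rw [ih (n / 10) _ (Nat.pos_of_ne_zero hn) (by
        have : 10 ^ (f + 1) = 10 ^ f * 10 := by ring
        omega)]
      rw [Nat.digits_def' (by norm_num : (1:Nat) < 10) h1]
      simp

theorem toDigits_eq_digits (n : Nat) (h : 0 < n) :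
    Nat.toDigits 10 n = ((Nat.digits 10 n).map Nat.digitChar).reverse := by
  have hb : n < 10 ^ (n + 1) := by
    calc n < 10 ^ n := Nat.lt_pow_self (by norm_num)
    _ ≤ 10 ^ (n + 1) := Nat.pow_le_pow_right (by norm_num) (Nat.le_succ n)
  simpa using toDigitsCore_eq_digits (n + 1) n [] h hb

-- int() of a single decimal digit character
theorem mapM_digitChar : ∀ (ds : List Nat), (∀ d ∈ ds, d < 10) →
    (ds.map Nat.digitChar).mapM (fun c => PySem.Int.ofChars? [c]) = some (ds.map (fun d => (d : Int)))
  | [], _ => rfl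
  | d :: ds, h => by
    have hd10 : d < 10 := h d (by simp)
    have hd : PySem.Int.ofChars? [Nat.digitChar d] = some (d : Int) := by
      interval_cases d <;> decide
    rw [List.map_cons, List.mapM_cons, hd, mapM_digitChar ds (fun x hx => h x (by simp [hx]))]
    rfl

theorem pyDigitSum?_eq (num : Int) (h : 0 ≤ num) :
    pyDigitSum? num = some (((Nat.digits 10 num.toNat).sum : Nat) : Int) := by
  unfold pyDigitSum?
  have hnn : ¬ num < 0 := by omega
  rcases Nat.eq_zero_or_pos num.toNat with h0 | hpos
  · have h00 : num = 0 := by omega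
    subst h00
    decide
  · rw [PySem.Int.toChars, if_neg hnn, toDigits_eq_digits num.toNat hpos,
        ← List.map_reverse,
        mapM_digitChar _ (fun d hd => Nat.digits_lt_base (by norm_num)
          (List.mem_reverse.mp hd))]
    simp only [Option.map_some, Option.some.injEq]
    generalize (Nat.digits 10 num.toNat) = l
    rw [← List.sum_reverse l]
    generalize l.reverse = r
    induction r with
    | nil => simp
    | cons x xs ih => simp_all

-- digit-sum facts
theorem one_le_digit_sum (n : Nat) (h1 : 1 ≤ n) : 1 ≤ (Nat.digits 10 n).sum := by
  induction n using Nat.strong_induction_on with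
  | _ n ih =>
    rw [Nat.digits_def' (by norm_num : (1:Nat) < 10) (by omega)]
    simp only [List.sum_cons]
    by_cases h : n % 10 = 0
    · have h10 : 10 ≤ n := by omega
      have := ih (n / 10) (by omega) (by omega)
      omega
    · omega

theorem digit_sum_le_90 (n : Nat) (h : n ≤ 2147483648) : (Nat.digits 10 n).sum ≤ 90 := by
  have hlen : (Nat.digits 10 n).length ≤ 10 :=
    (Nat.digits_length_le_iff (by norm_num) n).mpr (by omega)
  have hsum : (Nat.digits 10 n).sum ≤ (Nat.digits 10 n).length • 9 :=
    List.sum_le_card_nsmul _ 9 (fun x hx => by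
      have := Nat.digits_lt_base (by norm_num : (1:Nat) < 10) hx; omega)
  simp only [smul_eq_mul] at hsum
  omega

theorem digit_sum_add_nine_le (n : Nat) (h : 10 ≤ n) : (Nat.digits 10 n).sum + 9 ≤ n := by
  rw [Nat.digits_def' (by norm_num : (1:Nat) < 10) (by omega)]
  simp only [List.sum_cons]
  have h1 : (Nat.digits 10 (n / 10)).sum ≤ n / 10 := Nat.digit_sum_le 10 (n / 10)
  omega

theorem digit_sum_mod9 (n : Nat) : n % 9 = (Nat.digits 10 n).sum % 9 :=
  Nat.modEq_nine_digits_sum n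

-- every positive multiple of 9 up to 99 maps to "apple" in the table
set_option maxRecDepth 10000 in
theorem table_apple (m : Int) (hd : 9 ∣ m) (h1 : 9 ≤ m) (h2 : m ≤ 99) :
    (fruitTable.get? m).getD "" = "apple" := by
  have : m = 9 ∨ m = 18 ∨ m = 27 ∨ m = 36 ∨ m = 45 ∨ m = 54 ∨ m = 63 ∨ m = 72 ∨ m = 81 ∨ m = 90 ∨ m = 99 := by omega
  rcases this with h | h | h | h | h | h | h | h | h | h | h <;> subst h <;> decide

theorem loopA_apple : ∀ (fuel : Nat) (num : Int), 100 ≤ num → num ≤ 2147483648 →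
    (9 ∣ num ∨ 101 ≤ num) → num.toNat < fuel → loopA fuel num = "apple" := by
  intro fuel
  induction fuel with
  | zero => intro num h1 _ _ hf; omega
  | succ f ih =>
    intro num h1 h2 _ hf
    have h0 : (0:Int) ≤ num := by omega
    have hcast : ((num.toNat : Int)) = num := Int.toNat_of_nonneg h0
    set s : Nat := (Nat.digits 10 num.toNat).sum with hs
    have hs1 : 1 ≤ s := one_le_digit_sum num.toNat (by omega)
    have hs90 : s ≤ 90 := digit_sum_le_90 num.toNat (by omega)
    have hsmod : num.toNat % 9 = s % 9 := digit_sum_mod9 num.toNat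
    have hdvd : (9:Int) ∣ (num - (s : Int)) := by omega
    simp only [loopA, if_pos h1]
    rw [pyDigitSum?_eq num h0, ← hs]
    by_cases hc : 100 ≤ num - (s : Int)
    · exact ih (num - (s : Int)) hc (by omega) (Or.inl hdvd) (by omega)
    · have h18 : 18 ≤ num - (s : Int) := by omega
      have hf1 : 18 ≤ (f : Int) := by omega
      rcases f with _ | g
      · omega
      · simp only [loopA, if_neg hc]
        exact table_apple _ hdvd (by omega) (by omega)

theorem low_apple (num : Int) (h1 : 10 ≤ num) (h2 : num ≤ 100) :
    subtract_sum num = "apple" := by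
  have h0 : (0:Int) ≤ num := by omega
  have hcast : ((num.toNat : Int)) = num := Int.toNat_of_nonneg h0
  simp only [subtract_sum, if_pos h2]
  rw [pyDigitSum?_eq num h0]
  set s : Nat := (Nat.digits 10 num.toNat).sum with hs
  have hs1 : 1 ≤ s := one_le_digit_sum num.toNat (by omega)
  have hs9 : s + 9 ≤ num.toNat := digit_sum_add_nine_le num.toNat (by omega)
  have hsmod : num.toNat % 9 = s % 9 := digit_sum_mod9 num.toNat
  have hdvd : (9:Int) ∣ (num - (s : Int)) := by omega
  exact table_apple _ hdvd (by omega) (by omega)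

-- ===== VERDICT (by name: the statement is the Claim_ definition above) =====
theorem subtract_sum_spec : Claim_equal_subtract_sum := by
  intro num hdom hpre
  unfold Spec_subtract_sum subtract_sum_alt
  unfold Dom_subtract_sum pvDomInt at hdom
  have hb : -2147483648 ≤ num ∧ num ≤ 2147483648 := of_decide_eq_true hdom
  unfold Pre_subtract_sum at hpre
  by_cases hc : num ≤ 100
  · exact low_apple num hpre hc
  · simp only [subtract_sum, if_neg hc]
    exact loopA_apple (num.toNat + 1) num (by omega) (by omega) (Or.inr (by omega)) (by omega)
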